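-- pv_equiv track=rewrite | github.com/Bonorinoa/lean_econ_api | src/formalizer.py | _detect_formalization_failed
-- ===== SOURCE A (Python) =====
-- def _detect_formalization_failed(lean_code: str) -> tuple[bool, str | None]:
--     """Check if Leanstral signalled it cannot formalize this claim."""
--     lines = lean_code.splitlines()[:5]
--     for i, line in enumerate(lines):
--         if "-- FORMALIZATION_FAILED" in line:
--             reason = None
--             for subsequent in lines[i + 1 :]:
--                 if subsequent.strip().startswith("-- Reason:"):
--                     reason = subsequent.strip().removeprefix("-- Reason:").strip()
--                     break
--             return True, reason
--     return False, None
-- ===== SOURCE B (Python) =====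
-- def _detect_formalization_failed(lean_code: str) -> tuple[bool, str | None]:
--     """Back-to-front pass: walk the (at most 5) lines in reverse, carrying the
--     reason text of the earliest reason line seen so far (i.e. the first one
--     below the current line); a marker line snapshots that carried reason."""
--     found = False
--     answer = None
--     reason_below = None
--     for line in reversed(lean_code.splitlines()[:5]):
--         if "-- FORMALIZATION_FAILED" in line:
--             found = True
--             answer = reason_below
--         stripped = line.strip()
--         if stripped.startswith("-- Reason:"):
--             reason_below = stripped.removeprefix("-- Reason:").strip()
--     return found, answer
-- ===== Notes on version B (the rewrite author's own statement) =====
-- stated objective: alternative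
-- what changed: Replaced A's forward scan with a nested re-scan of the slice after the marker by a single back-to-front pass over the reversed first five lines that carries the most recently seen reason text as an accumulator and snapshots it at each marker line, so no slicing, enumerate, inner loop or break is needed.
import Mathlib
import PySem

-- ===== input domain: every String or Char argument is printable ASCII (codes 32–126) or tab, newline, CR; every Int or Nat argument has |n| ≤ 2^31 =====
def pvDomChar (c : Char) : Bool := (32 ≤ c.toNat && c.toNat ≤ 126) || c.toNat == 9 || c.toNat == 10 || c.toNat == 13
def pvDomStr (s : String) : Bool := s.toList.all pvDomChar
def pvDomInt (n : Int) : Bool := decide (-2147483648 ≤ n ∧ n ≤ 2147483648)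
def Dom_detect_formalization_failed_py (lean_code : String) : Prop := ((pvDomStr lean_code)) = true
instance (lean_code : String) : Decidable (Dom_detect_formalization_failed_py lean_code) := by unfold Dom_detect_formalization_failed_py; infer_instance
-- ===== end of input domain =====

-- B replaces A's forward scan + nested re-scan by one backward pass carrying the reason seen below (objective: alternative).

-- s.removeprefix(p): exact hand port (PySem has no removeprefix) — if s starts with p, drop len(p) chars, else s
def pyRemoveprefix (s p : String) : String :=
  if PySem.Str.startswith s p then PySem.Str.slice s (some (PySem.Str.len p)) none else s

-- ===== PORT A =====
-- inner loop: 'for subsequent in lines[i+1:]' with break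
def aInner : List String → Option String
  | [] => none
  | l :: rest =>
    if PySem.Str.startswith (PySem.Str.strip l) "-- Reason:" then
      some (PySem.Str.strip (pyRemoveprefix (PySem.Str.strip l) "-- Reason:"))
    else aInner rest

-- outer loop: 'for i, line in enumerate(lines)' with early return
def aOuter (lines : List String) : List (Int × String) → Bool × Option String
  | [] => (false, none)
  | (i, line) :: rest =>
    if PySem.Str.isIn "-- FORMALIZATION_FAILED" line then
      (true, aInner (PySem.List.slice lines (some (i + 1)) none))
    else aOuter lines rest

def detect_formalization_failed_py (lean_code : String) : Bool × Option String :=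
  let lines := PySem.List.slice (PySem.Str.splitlines lean_code) none (some 5)
  aOuter lines (PySem.List.enumerate lines 0)

-- ===== PORT B =====
-- one step of the backward pass: state = (found, answer, reason_below)
def bStep (st : Bool × Option String × Option String) (line : String) :
    Bool × Option String × Option String :=
  let st1 := if PySem.Str.isIn "-- FORMALIZATION_FAILED" line then (true, st.2.2, st.2.2) else st
  let stripped := PySem.Str.strip line
  if PySem.Str.startswith stripped "-- Reason:" then
    (st1.1, st1.2.1, some (PySem.Str.strip (pyRemoveprefix stripped "-- Reason:")))
  else st1

def detect_formalization_failed_py_alt (lean_code : String) : Bool × Option String :=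
  let st := ((PySem.List.slice (PySem.Str.splitlines lean_code) none (some 5)).reverse).foldl
      bStep (false, none, none)
  (st.1, st.2.1)

-- ===== PRECONDITION & SPEC =====
def Spec_detect_formalization_failed_py (lean_code : String) (out : Bool × Option String) : Prop := out = detect_formalization_failed_py_alt lean_code
instance (lean_code : String) (out : Bool × Option String) : Decidable (Spec_detect_formalization_failed_py lean_code out) := by unfold Spec_detect_formalization_failed_py; infer_instance

-- ===== CLAIM (what is proved, stated in full; the proofs are below) =====
def Claim_equal_detect_formalization_failed_py : Prop := ∀ (lean_code : String), Dom_detect_formalization_failed_py lean_code → Spec_detect_formalization_failed_py lean_code (detect_formalization_failed_py lean_code)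

-- ===== LEMMAS AND PROOFS =====

-- forward characterisation of A's outer loop (proof-only helper)
def fwd : List String → Bool × Option String
  | [] => (false, none)
  | l :: rest =>
    if PySem.Str.isIn "-- FORMALIZATION_FAILED" l then (true, aInner rest) else fwd rest

-- A's outer loop over enumerate of the k-th suffix is the forward characterisation on that suffix
theorem outer_eq (ls : List String) (k : Nat) :
    aOuter ls (PySem.List.enumerate (ls.drop k) (k : Int)) = fwd (ls.drop k) := by
  by_cases h : k < ls.length
  · rw [List.drop_eq_getElem_cons h]
    rw [PySem.List.enumerate_cons]
    show aOuter ls ((↑k, ls[k]) :: PySem.List.enumerate (ls.drop (k+1)) ((k : Int) + 1)) = _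
    have hc : ((k : Int) + 1) = ((k + 1 : Nat) : Int) := by push_cast; ring
    simp only [aOuter, fwd, hc, PySem.List.slice_from_natCast]
    split
    · rfl
    · exact outer_eq ls (k + 1)
  · rw [List.drop_eq_nil_of_le (by omega)]
    rfl
termination_by ls.length - k

-- B's backward pass, read as a foldr, computes (fwd, aInner)
theorem foldr_eq (l : List String) :
    l.foldr (fun x y => bStep y x) (false, none, none) = ((fwd l).1, (fwd l).2, aInner l) := by
  induction l with
  | nil => rfl
  | cons a t ih =>
    rw [List.foldr_cons, ih]
    simp only [bStep, fwd, aInner]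
    split <;> split <;> simp

-- ===== VERDICT (by name: the statement is the Claim_ definition above) =====
theorem detect_formalization_failed_py_spec : Claim_equal_detect_formalization_failed_py := by
  intro lean_code _
  unfold Spec_detect_formalization_failed_py detect_formalization_failed_py detect_formalization_failed_py_alt
  rw [List.foldl_reverse, foldr_eq]
  simpa using outer_eq (PySem.List.slice (PySem.Str.splitlines lean_code) none (some 5)) 0
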